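-- pv_equiv track=rewrite | github.com/Jeff-Stoyanoff/Algo-Practice | codewars.py | speed_limit
-- ===== SOURCE A (Python) =====
-- def speed_limit(speed, signals):
--     fines = 0
--     for i in range(len(signals)):
--         if speed - signals[i] > 29:
--             fines += 500
--         elif speed - signals[i] > 19 and  speed - signals[i] < 30:
--             fines += 250
--         elif speed - signals[i] > 9 and speed - signals[i] < 20:
--             fines += 100
--         else:
--             fines += 0
--     return fines
-- ===== SOURCE B (Python) =====
-- def speed_limit(speed, signals):
--     # Marginal-fine decomposition: each tier boundary crossed adds a surcharge
--     # (>9: +100, >19: +150 more, >29: +250 more -> 100/250/500 totals).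
--     over10 = sum(1 for s in signals if speed - s > 9)
--     over20 = sum(1 for s in signals if speed - s > 19)
--     over30 = sum(1 for s in signals if speed - s > 29)
--     return 100 * over10 + 150 * over20 + 250 * over30
-- ===== Notes on version B (the rewrite author's own statement) =====
-- stated objective: alternative
-- what changed: Replaces the per-signal if/elif tier classification with a marginal-surcharge decomposition: three threshold counts (d>9, d>19, d>29) combined linearly as 100*c10+150*c20+250*c30, exploiting that each fine is the sum of the surcharges of the boundaries crossed.
import Mathlib
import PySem

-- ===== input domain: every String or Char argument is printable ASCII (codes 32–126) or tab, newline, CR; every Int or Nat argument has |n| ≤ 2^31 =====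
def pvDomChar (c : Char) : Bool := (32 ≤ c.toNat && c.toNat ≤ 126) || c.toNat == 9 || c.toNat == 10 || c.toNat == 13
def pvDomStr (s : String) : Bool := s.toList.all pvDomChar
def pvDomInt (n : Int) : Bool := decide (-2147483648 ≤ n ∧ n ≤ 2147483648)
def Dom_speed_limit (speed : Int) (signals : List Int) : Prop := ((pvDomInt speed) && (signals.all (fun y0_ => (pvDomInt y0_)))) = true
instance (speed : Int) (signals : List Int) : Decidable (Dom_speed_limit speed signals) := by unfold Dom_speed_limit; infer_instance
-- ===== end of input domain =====

-- B replaces A's per-signal if/elif tier cascade with three threshold counts combined linearly (marginal surcharges); alternative decomposition, same O(n) cost.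


-- ===== PORT A =====
-- for i in range(len(signals)): if/elif cascade accumulating fines
def speed_limit (speed : Int) (signals : List Int) : Int :=
  (PySem.List.pyRange 0 signals.length 1).foldl (fun fines i =>
    let s := PySem.List.pyGetD signals i 0   -- index always in range
    if speed - s > 29 then fines + 500
    else if speed - s > 19 ∧ speed - s < 30 then fines + 250
    else if speed - s > 9 ∧ speed - s < 20 then fines + 100
    else fines + 0) 0

-- ===== PORT B =====
-- over10/over20/over30 = three generator-expression counts; result a linear combination
def speed_limit_alt (speed : Int) (signals : List Int) : Int :=
  let over10 : Int := signals.countP (fun s => decide (speed - s > 9))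
  let over20 : Int := signals.countP (fun s => decide (speed - s > 19))
  let over30 : Int := signals.countP (fun s => decide (speed - s > 29))
  100 * over10 + 150 * over20 + 250 * over30

-- ===== PRECONDITION & SPEC =====
def Spec_speed_limit (speed : Int) (signals : List Int) (out : Int) : Prop := out = speed_limit_alt speed signals
instance (speed : Int) (signals : List Int) (out : Int) : Decidable (Spec_speed_limit speed signals out) := by unfold Spec_speed_limit; infer_instance

-- ===== CLAIM (what is proved, stated in full; the proofs are below) =====
def Claim_equal_speed_limit : Prop := ∀ (speed : Int) (signals : List Int), Dom_speed_limit speed signals → Spec_speed_limit speed signals (speed_limit speed signals)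

-- ===== LEMMAS AND PROOFS =====

-- A's fold over the signals equals the linear combination of the three counts
theorem pv_foldl_eq (speed : Int) (signals : List Int) (init : Int) :
    signals.foldl (fun fines s =>
      if speed - s > 29 then fines + 500
      else if speed - s > 19 ∧ speed - s < 30 then fines + 250
      else if speed - s > 9 ∧ speed - s < 20 then fines + 100
      else fines + 0) init =
    init + 100 * (signals.countP (fun s => decide (speed - s > 9)) : Int)
         + 150 * (signals.countP (fun s => decide (speed - s > 19)) : Int)
         + 250 * (signals.countP (fun s => decide (speed - s > 29)) : Int) := by
  induction signals generalizing init with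
  | nil => simp
  | cons x xs ih =>
    simp only [List.foldl_cons, List.countP_cons, ih, decide_eq_true_eq]
    split_ifs <;> push_cast <;> omega

-- ===== VERDICT (by name: the statement is the Claim_ definition above) =====
theorem speed_limit_spec : Claim_equal_speed_limit := by
  intro speed signals _
  unfold Spec_speed_limit speed_limit speed_limit_alt
  rw [PySem.List.foldl_pyRange_zero_pyGetD' (f := fun fines s =>
      if speed - s > 29 then fines + 500
      else if speed - s > 19 ∧ speed - s < 30 then fines + 250
      else if speed - s > 9 ∧ speed - s < 20 then fines + 100
      else fines + 0)]
  simpa using pv_foldl_eq speed signals 0
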